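-- pv_equiv track=rewrite | github.com/Matthew-D-Johnston/python-coding-challenges | edabit/medium/robot_path.py | robot_path
-- ===== SOURCE A (Python) =====
-- def robot_path(steps):
--   destination1 = [2, 3]
--   destination2 = [3, -4]
--   destination = [0, 0]
--
--   for step in steps:
--     if step == 'n':
--       destination[0] += 1
--     elif step == 's':
--       destination[0] -= 1
--     elif step == 'e':
--       destination[1] += 1
--     elif step == 'w':
--       destination[1] -= 1
--
--   if destination1[0] == destination[0] and destination1[1] == destination[1]:
--     return True
--
--   if destination2[0] == destination[0] and destination2[1] == destination[1]:
--     return True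
--
--   return False
-- ===== SOURCE B (Python) =====
-- def _disp(seq, lo, hi):
--   # net displacement of seq[lo:hi], by divide and conquer
--   if hi <= lo:
--     return (0, 0)
--   if hi == lo + 1:
--     step = seq[lo]
--     if step == 'n': return (1, 0)
--     if step == 's': return (-1, 0)
--     if step == 'e': return (0, 1)
--     if step == 'w': return (0, -1)
--     return (0, 0)
--   mid = (lo + hi) // 2
--   r1, c1 = _disp(seq, lo, mid)
--   r2, c2 = _disp(seq, mid, hi)
--   return (r1 + r2, c1 + c2)
--
-- def robot_path(steps):
--   seq = list(steps)
--   return _disp(seq, 0, len(seq)) in ((2, 3), (3, -4))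
-- ===== Notes on version B (the rewrite author's own statement) =====
-- stated objective: alternative
-- what changed: Replaces A's left-to-right per-step coordinate accumulator with a divide-and-conquer recursion: the net displacement of steps[lo:hi] is computed by splitting the range at the midpoint and adding the displacements of the two halves (correct since displacement is additive over concatenation), then the result is tested for membership in the pair of target destinations.
import Mathlib
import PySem

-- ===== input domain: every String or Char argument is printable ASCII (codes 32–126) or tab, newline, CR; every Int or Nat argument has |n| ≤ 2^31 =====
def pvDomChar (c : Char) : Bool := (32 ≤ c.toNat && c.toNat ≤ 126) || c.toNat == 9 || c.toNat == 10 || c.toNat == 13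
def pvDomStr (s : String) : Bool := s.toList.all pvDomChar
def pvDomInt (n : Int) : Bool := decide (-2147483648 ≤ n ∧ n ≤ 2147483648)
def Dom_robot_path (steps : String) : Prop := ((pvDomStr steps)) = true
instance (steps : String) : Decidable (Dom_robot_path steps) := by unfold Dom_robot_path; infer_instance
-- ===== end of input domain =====

-- B replaces A's left-to-right per-step coordinate accumulator with a
-- divide-and-conquer recursion on index ranges (objective: alternative).

-- ===== PORT A =====
-- one loop iteration of A: update destination according to the step character
def robotStepA (d : Int × Int) (c : Char) : Int × Int :=
  if c = 'n' then (d.1 + 1, d.2)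
  else if c = 's' then (d.1 - 1, d.2)
  else if c = 'e' then (d.1, d.2 + 1)
  else if c = 'w' then (d.1, d.2 - 1)
  else d

def robot_path (steps : String) : Bool :=
  let destination1 : Int × Int := (2, 3)
  let destination2 : Int × Int := (3, -4)
  let destination := steps.toList.foldl robotStepA (0, 0)
  if destination1.1 = destination.1 && destination1.2 = destination.2 then true
  else if destination2.1 = destination.1 && destination2.2 = destination.2 then true
  else false

-- ===== PORT B =====
-- the singleton-range branch of _disp (the chain of four comparisons on seq[lo])
def robotDeltaB (c : Char) : Int × Int :=
  if c = 'n' then (1, 0)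
  else if c = 's' then (-1, 0)
  else if c = 'e' then (0, 1)
  else if c = 'w' then (0, -1)
  else (0, 0)

-- _disp: net displacement of seq[lo:hi] by splitting the range at the midpoint.
-- seq[lo] is in range on every call reachable from robot_path_alt; `getD` merely totalizes it.
def robotDispB (seq : List Char) (lo hi : Nat) : Int × Int :=
  if hi ≤ lo then (0, 0)
  else if hi = lo + 1 then robotDeltaB (seq.getD lo '?')
  else
    let mid := (lo + hi) / 2
    let p := robotDispB seq lo mid
    let q := robotDispB seq mid hi
    (p.1 + q.1, p.2 + q.2)
termination_by hi - lo
decreasing_by all_goals omega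

def robot_path_alt (steps : String) : Bool :=
  let seq := steps.toList
  let d := robotDispB seq 0 seq.length
  decide (d = ((2 : Int), (3 : Int))) || decide (d = (3, -4))

-- ===== PRECONDITION & SPEC =====
def Spec_robot_path (steps : String) (out : Bool) : Prop := out = robot_path_alt steps
instance (steps : String) (out : Bool) : Decidable (Spec_robot_path steps out) := by unfold Spec_robot_path; infer_instance

-- ===== CLAIM (what is proved, stated in full; the proofs are below) =====
def Claim_equal_robot_path : Prop := ∀ (steps : String), Dom_robot_path steps → Spec_robot_path steps (robot_path steps)

-- ===== LEMMAS AND PROOFS =====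
-- net-displacement of a list as count arithmetic
def robotCnt (m : List Char) : Int × Int :=
  ((m.count 'n' : Int) - (m.count 's' : Int), (m.count 'e' : Int) - (m.count 'w' : Int))

lemma robot_foldl (l : List Char) (a b : Int) :
    l.foldl robotStepA (a, b) = (a + (robotCnt l).1, b + (robotCnt l).2) := by
  induction l generalizing a b with
  | nil => simp [robotCnt]
  | cons c t ih =>
    simp only [List.foldl_cons, robotStepA, robotCnt] at *
    by_cases hn : c = 'n'
    · subst hn; simp [ih, Prod.ext_iff]; omega
    · by_cases hs : c = 's'
      · subst hs; simp [hn, ih, Prod.ext_iff]; omega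
      · by_cases he : c = 'e'
        · subst he; simp [hn, hs, ih, Prod.ext_iff]; omega
        · by_cases hw : c = 'w'
          · subst hw; simp [hn, hs, he, ih, Prod.ext_iff]; omega
          · simp [hn, hs, he, hw, ih]

lemma robotCnt_append (u v : List Char) :
    robotCnt (u ++ v) = ((robotCnt u).1 + (robotCnt v).1, (robotCnt u).2 + (robotCnt v).2) := by
  simp [robotCnt, List.count_append, Prod.ext_iff]; omega

lemma robotCnt_single (c : Char) : robotCnt [c] = robotDeltaB c := by
  unfold robotCnt robotDeltaB
  by_cases hn : c = 'n'
  · subst hn; decide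
  · by_cases hs : c = 's'
    · subst hs; decide
    · by_cases he : c = 'e'
      · subst he; decide
      · by_cases hw : c = 'w'
        · subst hw; decide
        · simp [hn, hs, he, hw]

lemma robotDispB_eq (seq : List Char) :
    ∀ (n lo hi : Nat), hi - lo ≤ n →
      robotDispB seq lo hi = robotCnt ((seq.drop lo).take (hi - lo)) := by
  intro n
  induction n with
  | zero =>
    intro lo hi h
    rw [robotDispB]
    have : hi ≤ lo := by omega
    simp [this, robotCnt, Nat.sub_eq_zero_of_le this]
  | succ m ih =>
    intro lo hi h
    rw [robotDispB]
    by_cases h1 : hi ≤ lo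
    · simp [h1, robotCnt, Nat.sub_eq_zero_of_le h1]
    · by_cases h2 : hi = lo + 1
      · subst h2
        simp only [h1, if_false]
        rcases Nat.lt_or_ge lo seq.length with hlt | hge
        · rw [show lo + 1 - lo = 1 by omega, List.drop_eq_getElem_cons hlt,
            List.take_succ_cons, List.take_zero, robotCnt_single]
          simp [List.getD, List.getElem?_eq_getElem hlt]
        · have hdrop : seq.drop lo = [] := List.drop_eq_nil_iff.mpr (by omega)
          have hnone : seq[lo]? = none := List.getElem?_eq_none (by omega)
          simp [hdrop, List.getD, hnone, robotDeltaB, robotCnt]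
      · simp only [h1, h2, if_false]
        have hmlo : lo < (lo + hi) / 2 := by omega
        have hmhi : (lo + hi) / 2 < hi := by omega
        rw [ih lo ((lo + hi) / 2) (by omega), ih ((lo + hi) / 2) hi (by omega)]
        have hsplit : (seq.drop lo).take (hi - lo)
            = (seq.drop lo).take ((lo + hi) / 2 - lo)
              ++ (seq.drop ((lo + hi) / 2)).take (hi - (lo + hi) / 2) := by
          have : hi - lo = ((lo + hi) / 2 - lo) + (hi - (lo + hi) / 2) := by omega
          rw [this, List.take_add]
          congr 1
          rw [List.drop_drop, show lo + ((lo + hi) / 2 - lo) = (lo + hi) / 2 by omega]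
        rw [hsplit, robotCnt_append]

-- ===== VERDICT (by name: the statement is the Claim_ definition above) =====
theorem robot_path_spec : Claim_equal_robot_path := by
  intro steps _
  unfold Spec_robot_path robot_path robot_path_alt
  simp only [robot_foldl, zero_add]
  rw [robotDispB_eq steps.toList steps.toList.length 0 steps.toList.length (by omega)]
  simp only [Nat.sub_zero, List.drop_zero, List.take_length]
  rcases robotCnt steps.toList with ⟨r, c⟩
  simp only [Prod.ext_iff]
  split_ifs <;> simp_all <;> omega
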